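-- pv_equiv track=rewrite | github.com/yoyoj1023/my-leetcode-solutions | quest/data-structures-and-algorithms/018-Construct-Target-Array-With-Multiple-Sums/answer.py | isPossible_v3
-- ===== SOURCE A (Python) =====
-- from typing import List
-- import heapq
--
-- def isPossible_v3(target: List[int]) -> bool:
--     from math import gcd
--     from functools import reduce
--
--     # 特殊情況處理
--     if len(target) == 1:
--         return target[0] == 1
--
--     # 如果所有數的 GCD > 1，則不可能
--     array_gcd = reduce(gcd, target)
--     if array_gcd > 1:
--         return False
--
--     total_sum = sum(target)
--     max_heap = [-num for num in target]
--     heapq.heapify(max_heap)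
--
--     while True:
--         max_val = -heapq.heappop(max_heap)
--
--         if max_val == 1:
--             return True
--
--         rest_sum = total_sum - max_val
--
--         # 邊界檢查
--         if rest_sum == 1:
--             return True
--
--         if rest_sum <= 0 or max_val <= rest_sum or max_val % rest_sum == 0:
--             return False
--
--         # 使用取餘數還原
--         old_val = max_val % rest_sum
--         total_sum = rest_sum + old_val
--         heapq.heappush(max_heap, -old_val)
-- ===== SOURCE B (Python) =====
-- from typing import List
--
-- def isPossible_v3(target: List[int]) -> bool:
--     from math import gcd
--     from functools import reduce
--
--     if len(target) == 1:
--         return target[0] == 1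
--
--     if reduce(gcd, target) > 1:
--         return False
--
--     arr = list(target)
--     total = sum(arr)
--
--     while True:
--         # find the current maximum by a plain scan (no heap)
--         max_val = arr[0]
--         for v in arr:
--             if v > max_val:
--                 max_val = v
--
--         if max_val == 1:
--             return True
--
--         rest_sum = total - max_val
--
--         if rest_sum == 1:
--             return True
--
--         if rest_sum <= 0 or max_val <= rest_sum or max_val % rest_sum == 0:
--             return False
--
--         old_val = max_val % rest_sum
--         arr.remove(max_val)
--         arr.append(old_val)
--         total = rest_sum + old_val
-- ===== Notes on version B (the rewrite author's own statement) =====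
-- stated objective: simpler
-- what changed: Replaces the negated max-heap (heapify/heappop/heappush) by a plain list: the current maximum is found by a linear scan and replaced via remove/append, keeping the len==1, GCD and modulo/boundary guards identical.
import Mathlib
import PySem

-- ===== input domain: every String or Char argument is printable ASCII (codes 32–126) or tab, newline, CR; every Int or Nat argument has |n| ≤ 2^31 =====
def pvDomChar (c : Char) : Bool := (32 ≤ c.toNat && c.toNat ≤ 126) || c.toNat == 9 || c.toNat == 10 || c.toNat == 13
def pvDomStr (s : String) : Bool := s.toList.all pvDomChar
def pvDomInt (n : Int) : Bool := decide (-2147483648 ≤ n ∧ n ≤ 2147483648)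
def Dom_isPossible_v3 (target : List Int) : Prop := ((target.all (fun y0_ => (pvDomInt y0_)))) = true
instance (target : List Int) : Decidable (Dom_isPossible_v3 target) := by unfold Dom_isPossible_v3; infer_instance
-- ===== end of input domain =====

-- B replaces the negated max-heap by a plain list with a linear max scan and remove/append (simpler: no heap, no negation). Return-value equivalence only; neither version mutates its argument.

-- ===== PORT A =====
-- helper: one reduce(gcd, ...) step (math.gcd on Int: nonnegative gcd)
def pyGcd (a b : Int) : Int := (Int.gcd a b : Int)

-- A's while-loop. heapq's max-heap of negated values is modelled by the list of
-- heap entries with heappop = the minimum entry (value-exact for heapq) and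
-- heappush = append; max_val = -m is inlined.
def loopA (heap : List Int) (total : Int) : Bool :=
  match heap.min? with
  | none => false   -- unreachable: heap never empty (guard for totality only)
  | some m =>
    if -m = 1 then true
    else if total - -m = 1 then true
    else if total - -m ≤ 0 then false
    else if -m ≤ total - -m then false
    else if PySem.Int.mod (-m) (total - -m) = 0 then false
    else loopA (heap.erase m ++ [-(PySem.Int.mod (-m) (total - -m))])
               (total - -m + PySem.Int.mod (-m) (total - -m))
termination_by total.toNat
decreasing_by
  have h2 := PySem.Int.mod_lt (a := -m) (b := total - -m) (by omega)
  omega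

def isPossible_v3 (target : List Int) : Bool :=
  match target with
  | [] => false   -- unreachable under Pre_: Python's reduce raises TypeError
  | t0 :: rest =>
    if target.length = 1 then decide (t0 = 1)
    else if rest.foldl pyGcd t0 > 1 then false
    else loopA (target.map (fun n => -n)) target.sum

-- ===== PORT B =====
-- B's for-loop scanning for the maximum: max_val = arr[0]; for v in arr: if v > max_val: max_val = v
def scanMax (arr : List Int) (a : Int) : Int :=
  arr.foldl (fun m v => if v > m then v else m) a

-- B's while-loop: max by linear scan, then arr.remove(max) and arr.append(old).
def loopB (arr : List Int) (total : Int) : Bool :=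
  match arr with
  | [] => false   -- unreachable: arr never empty (guard for totality only)
  | a :: _ =>
    if scanMax arr a = 1 then true
    else if total - scanMax arr a = 1 then true
    else if total - scanMax arr a ≤ 0 then false
    else if scanMax arr a ≤ total - scanMax arr a then false
    else if PySem.Int.mod (scanMax arr a) (total - scanMax arr a) = 0 then false
    else loopB (arr.erase (scanMax arr a) ++ [PySem.Int.mod (scanMax arr a) (total - scanMax arr a)])
               (total - scanMax arr a + PySem.Int.mod (scanMax arr a) (total - scanMax arr a))
termination_by total.toNat
decreasing_by
  have h1 := PySem.Int.mod_nonneg (a := scanMax arr a) (b := total - scanMax arr a) (by omega)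
  have h2 := PySem.Int.mod_lt (a := scanMax arr a) (b := total - scanMax arr a) (by omega)
  omega

def isPossible_v3_alt (target : List Int) : Bool :=
  match target with
  | [] => false   -- unreachable under Pre_: Python's reduce raises TypeError
  | t0 :: rest =>
    if target.length = 1 then decide (t0 = 1)
    else if rest.foldl pyGcd t0 > 1 then false
    else loopB target target.sum

-- ===== PRECONDITION & SPEC =====
-- Pre_ excludes only the empty list, on which A (and B) raise TypeError in reduce.
def Pre_isPossible_v3 (target : List Int) : Prop := target ≠ []
instance (target : List Int) : Decidable (Pre_isPossible_v3 target) := by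
  unfold Pre_isPossible_v3; infer_instance

def pvWitness_isPossible_v3 : List Int := [9, 3, 5]

def Spec_isPossible_v3 (target : List Int) (out : Bool) : Prop := out = isPossible_v3_alt target
instance (target : List Int) (out : Bool) : Decidable (Spec_isPossible_v3 target out) := by unfold Spec_isPossible_v3; infer_instance

-- ===== CLAIM (what is proved, stated in full; the proofs are below) =====
def Claim_equal_isPossible_v3 : Prop := ∀ (target : List Int), Dom_isPossible_v3 target → Pre_isPossible_v3 target → Spec_isPossible_v3 target (isPossible_v3 target)

-- ===== LEMMAS AND PROOFS =====

-- B's scan computes the max; A's min of the negated list is its negation.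
lemma foldl_min_neg (l : List Int) (a : Int) :
    (l.map (fun n => -n)).foldl min (-a) =
      -(l.foldl (fun m v => if v > m then v else m) a) := by
  induction l generalizing a with
  | nil => simp
  | cons b l ih =>
    simp only [List.map_cons, List.foldl_cons]
    rw [show min (-a) (-b) = -(if b > a then b else a) by split_ifs <;> omega]
    exact ih _

lemma min?_map_neg (a : Int) (l : List Int) :
    ((a :: l).map (fun n => -n)).min? = some (-(scanMax (a :: l) a)) := by
  have h := foldl_min_neg l a
  simp only [List.min?, List.map_cons, scanMax, List.foldl_cons]
  rw [h]
  congr 2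
  split_ifs with hb
  · omega
  · rfl

lemma loopA_eq_loopB (N : Nat) :
    ∀ (arr : List Int) (total : Int), arr ≠ [] → total.toNat ≤ N →
      loopA (arr.map (fun n => -n)) total = loopB arr total := by
  induction N with
  | zero =>
    intro arr total hne hle
    match arr with
    | a :: l =>
      rw [loopA.eq_def, loopB.eq_def, min?_map_neg]
      simp only [neg_neg]
      split_ifs <;> first | rfl | omega
  | succ N ih =>
    intro arr total hne hle
    match arr with
    | a :: l =>
      rw [loopA.eq_def, loopB.eq_def, min?_map_neg]
      simp only [neg_neg]
      split_ifs with h1 h2 h3 h4 h5 <;> try rfl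
      have hmap : ((a :: l).erase (scanMax (a :: l) a) ++
            [PySem.Int.mod (scanMax (a :: l) a) (total - scanMax (a :: l) a)]).map (fun n => -n)
          = ((a :: l).map (fun n => -n)).erase (-(scanMax (a :: l) a)) ++
            [-(PySem.Int.mod (scanMax (a :: l) a) (total - scanMax (a :: l) a))] := by
        rw [List.map_append, List.map_erase (fun x y hxy => by omega)]
        rfl
      rw [← hmap]
      apply ih
      · simp
      · have h6 := PySem.Int.mod_nonneg (a := scanMax (a :: l) a)
          (b := total - scanMax (a :: l) a) (by omega)
        have h7 := PySem.Int.mod_lt (a := scanMax (a :: l) a)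
          (b := total - scanMax (a :: l) a) (by omega)
        omega

-- ===== VERDICT (by name: the statement is the Claim_ definition above) =====
theorem isPossible_v3_spec : Claim_equal_isPossible_v3 := by
  intro target _ hpre
  unfold Spec_isPossible_v3
  match target with
  | [] => exact absurd rfl hpre
  | t0 :: rest =>
    unfold isPossible_v3 isPossible_v3_alt
    simp only
    split_ifs with h1 h2 <;> try rfl
    exact loopA_eq_loopB (t0 :: rest).sum.toNat _ _ (by simp) le_rfl
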